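-- pv_equiv track=rewrite | github.com/communitiesuk/funding-service-design-utils | fsd_utils/authentication/utils.py | get_highest_role_map
-- ===== SOURCE A (Python) =====
-- from typing import Mapping
--
-- _ROLE_HIERARCHY = [
--     "LEAD_ASSESSOR",
--     "ASSESSOR",
--     "COMMENTER",
-- ]
--
-- def get_highest_role_map(roles: list[str]) -> Mapping[str, str]:
--     roles_with_fund_prefix = tuple(f"_{rh}" for rh in _ROLE_HIERARCHY)
--     filtered_roles = [r for r in roles if r.endswith(roles_with_fund_prefix)]
--
--     fund_short_name_to_roles_list = {}
--     for role in filtered_roles: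
--         fund_short_name, sub_role = role.split("_", 1)
--         if fund_short_name in fund_short_name_to_roles_list:
--             fund_short_name_to_roles_list[fund_short_name].append(sub_role)
--         else:
--             fund_short_name_to_roles_list[fund_short_name] = [sub_role]
--
--     fund_short_name_to_highest_role = {}
--     for fund_short_name, roles_list in fund_short_name_to_roles_list.items():
--         highest_role, *_ = sorted(roles_list, key=lambda x: _ROLE_HIERARCHY.index(x))
--         fund_short_name_to_highest_role[fund_short_name] = highest_role
--
--     return fund_short_name_to_highest_role
-- ===== SOURCE B (Python) =====
-- _ROLE_HIERARCHY = [
--     "LEAD_ASSESSOR",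
--     "ASSESSOR",
--     "COMMENTER",
-- ]
--
--
-- def get_highest_role_map(roles: list[str]):
--     suffixes = tuple(f"_{rh}" for rh in _ROLE_HIERARCHY)
--     best = {}  # fund short name -> (hierarchy index, sub_role) of best role seen
--     for role in roles:
--         if not role.endswith(suffixes):
--             continue
--         fund_short_name, sub_role = role.split("_", 1)
--         idx = _ROLE_HIERARCHY.index(sub_role)
--         if fund_short_name not in best or idx < best[fund_short_name][0]:
--             best[fund_short_name] = (idx, sub_role)
--     return {fund: sub for fund, (_, sub) in best.items()}
-- ===== Notes on version B (the rewrite author's own statement) =====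
-- stated objective: simpler
-- what changed: Replaces A's two-phase group-then-sort (build a dict of per-fund role lists, then sort each list by hierarchy index and take the head) with a single streaming pass that keeps, per fund, only the sub-role with the smallest hierarchy index seen so far.
import Mathlib
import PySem

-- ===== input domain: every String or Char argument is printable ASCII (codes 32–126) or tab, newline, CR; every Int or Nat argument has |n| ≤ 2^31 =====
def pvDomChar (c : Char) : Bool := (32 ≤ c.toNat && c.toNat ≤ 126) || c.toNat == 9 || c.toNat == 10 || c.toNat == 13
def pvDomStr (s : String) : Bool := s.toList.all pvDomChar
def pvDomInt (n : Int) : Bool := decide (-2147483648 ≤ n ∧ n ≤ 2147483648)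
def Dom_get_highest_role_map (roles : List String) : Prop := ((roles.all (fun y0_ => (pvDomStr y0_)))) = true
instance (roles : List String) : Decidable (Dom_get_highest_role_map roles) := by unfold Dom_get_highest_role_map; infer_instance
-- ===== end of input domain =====

-- B replaces A's group-then-sort (build lists per fund, sort each by hierarchy index, take the head)
-- by a single streaming pass keeping, per fund, the sub-role with the smallest hierarchy index seen so far.

-- ===== PORT A =====
-- module constant _ROLE_HIERARCHY (shared by both Pythons)
def pvHier : List String := ["LEAD_ASSESSOR", "ASSESSOR", "COMMENTER"]

-- roles_with_fund_prefix = tuple(f"_{rh}" for rh in _ROLE_HIERARCHY)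
def pvSuffixes : List String := pvHier.map (fun rh => String.ofList ('_' :: rh.toList))

-- r.endswith(tuple) is true iff r ends with one of its members
def pvEndsOk (r : String) : Bool := pvSuffixes.any (fun suf => PySem.Str.endswith r suf)

-- _ROLE_HIERARCHY.index(x); index? = none is Python's ValueError, excluded by Pre_ (default never reached there)
def pvKey (x : String) : Nat := (PySem.List.index? pvHier x).getD 3

-- loop body of A's grouping loop; the non-[fund, sub] split shapes are unreachable
-- (every filtered role contains '_'), Python's unpacking error lies outside Pre_
def pvGroupStep (d : PySem.Dict String (List String)) (role : String) :
    PySem.Dict String (List String) :=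
  match PySem.Str.splitMax? role "_" 1 with
  | some [fund, sub] =>
      if d.contains fund then d.modify fund [] (fun l => l ++ [sub])
      else d.insert fund [sub]
  | _ => d

-- loop body of A's second loop: highest_role, *_ = sorted(roles_list, key=_ROLE_HIERARCHY.index)
-- ([] unreachable: every group list is nonempty)
def pvBestStep (d : PySem.Dict String String) (p : String × List String) :
    PySem.Dict String String :=
  match PySem.List.sorted p.2 pvKey false with
  | h :: _ => d.insert p.1 h
  | [] => d

def get_highest_role_map (roles : List String) : List (String × String) :=
  -- filtered = [r for r in roles if r.endswith(...)]; groups = first loop; out = second loop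
  ((((roles.filter pvEndsOk).foldl pvGroupStep PySem.Dict.empty).items.foldl
      pvBestStep PySem.Dict.empty)).items

-- ===== PORT B =====
-- loop body of B's single pass: keep per fund the (index, sub_role) with the smallest index seen
def pvScanStep (d : PySem.Dict String (Nat × String)) (role : String) :
    PySem.Dict String (Nat × String) :=
  if pvEndsOk role then
    match PySem.Str.splitMax? role "_" 1 with
    | some [fund, sub] =>
        let idx := pvKey sub
        match d.get? fund with
        | none => d.insert fund (idx, sub)
        | some b => if idx < b.1 then d.insert fund (idx, sub) else d
    | _ => d
  else d

def get_highest_role_map_alt (roles : List String) : List (String × String) :=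
  (roles.foldl pvScanStep PySem.Dict.empty).items.map (fun p => (p.1, p.2.2))

-- ===== PRECONDITION & SPEC =====
-- true iff splitting off the fund prefix leaves a sub-role that is exactly one of the three hierarchy names
def pvSubOk (r : String) : Bool :=
  match PySem.Str.splitMax? r "_" 1 with
  | some [_, sub] => pvHier.contains sub
  | _ => false

-- Pre_ excludes exactly the inputs where Python raises ValueError: a role ending in a hierarchy
-- suffix whose part after the first '_' is not itself a hierarchy name (e.g. "F_DEF_ASSESSOR").
def Pre_get_highest_role_map (roles : List String) : Prop :=
  ∀ r ∈ roles, pvEndsOk r = true → pvSubOk r = true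
instance (roles : List String) : Decidable (Pre_get_highest_role_map roles) := by
  unfold Pre_get_highest_role_map; infer_instance

def pvWitness_get_highest_role_map : List String :=
  ["COF_LEAD_ASSESSOR", "COF_COMMENTER", "NSTF_ASSESSOR", "hello"]

def Spec_get_highest_role_map (roles : List String) (out : List (String × String)) : Prop := out = get_highest_role_map_alt roles
instance (roles : List String) (out : List (String × String)) : Decidable (Spec_get_highest_role_map roles out) := by unfold Spec_get_highest_role_map; infer_instance

-- ===== CLAIM (what is proved, stated in full; the proofs are below) =====
def Claim_equal_get_highest_role_map : Prop := ∀ (roles : List String), Dom_get_highest_role_map roles → Pre_get_highest_role_map roles → Spec_get_highest_role_map roles (get_highest_role_map roles)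

-- ===== LEMMAS AND PROOFS =====

theorem pvWitness_ok :
    Dom_get_highest_role_map pvWitness_get_highest_role_map ∧
    Pre_get_highest_role_map pvWitness_get_highest_role_map := by decide

-- pvKey is injective on the hierarchy (distinct names have distinct indices)
theorem pvKey_inj (x : String) (hx : x ∈ pvHier) (y : String) (hy : y ∈ pvHier)
    (h : pvKey x = pvKey y) : x = y := by
  fin_cases hx <;> fin_cases hy <;> revert h <;> decide

-- the head of A's sorted group is the (unique) sub-role of minimal hierarchy index
theorem pvSortedHead (rl : List String) (bs : String) (hmem : bs ∈ rl)
    (hhier : ∀ x ∈ rl, x ∈ pvHier) (hmin : ∀ y ∈ rl, pvKey bs ≤ pvKey y) :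
    ∃ t, PySem.List.sorted rl pvKey false = bs :: t := by
  cases hs : PySem.List.sorted rl pvKey false with
  | nil =>
      rw [PySem.List.sorted_eq_nil_iff] at hs
      subst hs; cases hmem
  | cons h t =>
      have hperm : (h :: t).Perm rl := by
        have := PySem.List.sorted_perm rl pvKey false
        rwa [hs] at this
      have hh_mem : h ∈ rl := hperm.mem_iff.mp (List.mem_cons_self)
      have hpw := PySem.List.sorted_pairwise rl pvKey
      rw [hs, List.pairwise_cons] at hpw
      have hmin' : pvKey h ≤ pvKey bs := by
        rcases List.mem_cons.mp (hperm.mem_iff.mpr hmem) with hb | hb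
        · rw [hb]
        · exact hpw.1 bs hb
      have hkeq : pvKey h = pvKey bs := le_antisymm hmin' (hmin h hh_mem)
      have : h = bs := pvKey_inj h (hhier h hh_mem) bs (hhier bs hmem) hkeq
      exact ⟨t, by rw [this]⟩

-- the invariant tying A's grouping dict to B's running-best dict
def pvInv (dA : PySem.Dict String (List String)) (dB : PySem.Dict String (Nat × String)) : Prop :=
  dA.keys.Nodup ∧ dA.keys = dB.keys ∧
  ∀ k, dA.contains k = true →
    (∀ x ∈ dA.getD k [], x ∈ pvHier) ∧
    (dB.getD k (0, "")).2 ∈ dA.getD k [] ∧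
    (dB.getD k (0, "")).1 = pvKey (dB.getD k (0, "")).2 ∧
    (∀ y ∈ dA.getD k [], pvKey (dB.getD k (0, "")).2 ≤ pvKey y)

theorem pvSubOk_elim (r : String) (h : pvSubOk r = true) :
    ∃ fund sub, PySem.Str.splitMax? r "_" 1 = some [fund, sub] ∧ sub ∈ pvHier := by
  unfold pvSubOk at h
  cases e : PySem.Str.splitMax? r "_" 1 with
  | none => rw [e] at h; simp at h
  | some parts =>
      rw [e] at h
      match parts, h with
      | [fund, sub], h =>
          exact ⟨fund, sub, rfl, by simpa using h⟩

theorem pvInv_step (dA : PySem.Dict String (List String)) (dB : PySem.Dict String (Nat × String))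
    (fund sub : String) (hsub : sub ∈ pvHier) (hinv : pvInv dA dB) :
    pvInv (if dA.contains fund then dA.modify fund [] (fun l => l ++ [sub])
           else dA.insert fund [sub])
          (match dB.get? fund with
           | none => dB.insert fund (pvKey sub, sub)
           | some b => if pvKey sub < b.1 then dB.insert fund (pvKey sub, sub) else dB) := by
  obtain ⟨hnd, hkeys, hk⟩ := hinv
  have hc : dB.contains fund = dA.contains fund := by
    simp [PySem.Dict.contains_eq_decide_mem_keys, hkeys]
  by_cases hf : dA.contains fund = true
  · -- fund already present: A appends, B keeps the better of old best and new
    have hBnone : dB.get? fund ≠ none := by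
      rw [Ne, PySem.Dict.get?_eq_none_iff_contains, hc, hf]; simp
    cases hb : dB.get? fund with
    | none => exact absurd hb hBnone
    | some b =>
        have hbD : dB.getD fund (0, "") = b := PySem.Dict.getD_of_get?_eq_some dB (0, "") hb
        have hAkeys : (dA.modify fund [] (fun l => l ++ [sub])).keys = dA.keys := by
          rw [PySem.Dict.keys_modify, PySem.Dict.keys_insert_of_contains dA _ hf]
        obtain ⟨hH, hM, hI, hLe⟩ := hk fund hf
        rw [hbD] at hM hI hLe
        have hBc : dB.contains fund = true := by rw [hc, hf]
        -- B's new dict in either branch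
        have hBkeys :
            (if pvKey sub < b.1 then dB.insert fund (pvKey sub, sub) else dB).keys = dB.keys := by
          split
          · exact PySem.Dict.keys_insert_of_contains dB _ hBc
          · rfl
        simp only [hf, if_true]
        refine ⟨by rw [hAkeys]; exact hnd, by rw [hAkeys, hBkeys]; exact hkeys, ?_⟩
        intro k hck
        rw [PySem.Dict.contains_modify] at hck
        by_cases hkf : k = fund
        · subst hkf
          rw [PySem.Dict.getD_modify_self]
          have hnew :
              (if pvKey sub < b.1 then dB.insert k (pvKey sub, sub) else dB).getD k (0, "") =
              (if pvKey sub < b.1 then (pvKey sub, sub) else b) := by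
            split
            · exact PySem.Dict.getD_insert_self dB k _ _
            · exact hbD
          rw [hnew]
          constructor
          · intro x hx
            rcases List.mem_append.mp hx with hx | hx
            · exact hH x hx
            · simp at hx; subst hx; exact hsub
          refine ⟨?_, ?_, ?_⟩
          · split
            · simp
            · exact List.mem_append.mpr (Or.inl hM)
          · split
            · rfl
            · exact hI
          · intro y hy
            rcases List.mem_append.mp hy with hy | hy
            · split
              · next hlt =>
                  exact le_of_lt (lt_of_lt_of_le (show pvKey sub < pvKey b.2 from hI ▸ hlt)
                    (hLe y hy))
              · exact hLe y hy
            · simp at hy; subst hy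
              split
              · rfl
              · next hnlt => exact Nat.le_of_not_lt (hI ▸ hnlt)
        · have hck' : dA.contains k = true := by
            rcases Bool.or_eq_true_iff.mp hck with h1 | h1
            · exact absurd (by simpa using h1) hkf
            · exact h1
          obtain ⟨hH', hM', hI', hLe'⟩ := hk k hck'
          rw [PySem.Dict.getD_modify_of_ne dA [] _ hkf]
          have : (if pvKey sub < b.1 then dB.insert fund (pvKey sub, sub) else dB).getD k (0, "") =
              dB.getD k (0, "") := by
            split
            · exact PySem.Dict.getD_insert_of_ne dB _ _ hkf
            · rfl
          rw [this]
          exact ⟨hH', hM', hI', hLe'⟩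
  · -- fund is new in both dicts
    have hf' : dA.contains fund = false := by simpa using hf
    have hBnone : dB.get? fund = none := by
      rw [PySem.Dict.get?_eq_none_iff_contains, hc]; exact hf'
    simp only [hf', if_false, hBnone, Bool.false_eq_true]
    have hnotmem : fund ∉ dA.keys := fun hm =>
      hf ((PySem.Dict.contains_iff_mem_keys dA fund).mpr hm)
    refine ⟨?_, ?_, ?_⟩
    · rw [PySem.Dict.keys_insert_of_not_contains dA _ hf']
      simp [List.nodup_append, hnd]
      intro a ha he
      exact hnotmem (he ▸ ha)
    · rw [PySem.Dict.keys_insert_of_not_contains dA _ hf',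
        PySem.Dict.keys_insert_of_not_contains dB _ (by rw [hc]; exact hf'), hkeys]
    · intro k hck
      by_cases hkf : k = fund
      · subst hkf
        rw [PySem.Dict.getD_insert_self, PySem.Dict.getD_insert_self]
        refine ⟨?_, by simp, rfl, ?_⟩
        · intro x hx; simp at hx; subst hx; exact hsub
        · intro y hy; simp at hy; subst hy; exact le_refl _
      · rw [PySem.Dict.getD_insert_of_ne dA _ _ hkf, PySem.Dict.getD_insert_of_ne dB _ _ hkf]
        rw [PySem.Dict.contains_insert] at hck
        rcases Bool.or_eq_true_iff.mp hck with h1 | h1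
        · exact absurd (by simpa using h1) hkf
        · exact hk k h1

theorem pvInv_fold (l : List String) (h : ∀ r ∈ l, pvEndsOk r = true → pvSubOk r = true)
    (dA : PySem.Dict String (List String)) (dB : PySem.Dict String (Nat × String))
    (hinv : pvInv dA dB) :
    pvInv ((l.filter pvEndsOk).foldl pvGroupStep dA) (l.foldl pvScanStep dB) := by
  induction l generalizing dA dB with
  | nil => simpa using hinv
  | cons r l ih =>
      by_cases hE : pvEndsOk r = true
      · obtain ⟨fund, sub, hsplit, hsub⟩ := pvSubOk_elim r (h r (by simp) hE)
        have hA : (r :: l).filter pvEndsOk = r :: l.filter pvEndsOk := by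
          simp [hE]
        rw [hA]
        simp only [List.foldl_cons]
        have hstepA : pvGroupStep dA r =
            (if dA.contains fund then dA.modify fund [] (fun l => l ++ [sub])
             else dA.insert fund [sub]) := by
          unfold pvGroupStep; rw [hsplit]
        have hstepB : pvScanStep dB r =
            (match dB.get? fund with
             | none => dB.insert fund (pvKey sub, sub)
             | some b => if pvKey sub < b.1 then dB.insert fund (pvKey sub, sub) else dB) := by
          unfold pvScanStep; rw [if_pos hE, hsplit]
        rw [hstepA, hstepB]
        exact ih (fun r hr hE => h r (by simp [hr]) hE) _ _
          (pvInv_step dA dB fund sub hsub hinv)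
      · have hA : (r :: l).filter pvEndsOk = l.filter pvEndsOk := by
          simp [hE]
        have hB : pvScanStep dB r = dB := by
          unfold pvScanStep; rw [if_neg hE]
        rw [hA, List.foldl_cons, hB]
        exact ih (fun r hr hE => h r (by simp [hr]) hE) dA dB hinv

-- ===== VERDICT (by name: the statement is the Claim_ definition above) =====
theorem get_highest_role_map_spec : Claim_equal_get_highest_role_map := by
  intro roles _hdom hpre
  unfold Spec_get_highest_role_map get_highest_role_map get_highest_role_map_alt
  have hinv0 : pvInv PySem.Dict.empty PySem.Dict.empty := by
    refine ⟨by simp [PySem.Dict.keys_empty], by simp [PySem.Dict.keys_empty], ?_⟩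
    intro k hck; rw [PySem.Dict.contains_empty] at hck; cases hck
  obtain ⟨hnd, hkeys, hk⟩ := pvInv_fold roles hpre PySem.Dict.empty PySem.Dict.empty hinv0
  set dA := (roles.filter pvEndsOk).foldl pvGroupStep PySem.Dict.empty with hdA
  set dB := roles.foldl pvScanStep PySem.Dict.empty with hdB
  -- rewrite A's second loop as a fold of fresh inserts of B's best values
  have hstep : ∀ (d : PySem.Dict String String), ∀ p ∈ dA.items,
      pvBestStep d p = d.insert p.1 (dB.getD p.1 (0, "")).2 := by
    intro d p hp
    have hget : dA.get? p.1 = some p.2 := by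
      have := PySem.Dict.get?_of_mem_items dA (k := p.1) (v := p.2) (by simpa using hp) hnd
      simpa using this
    have hcont : dA.contains p.1 = true := by
      rcases h : dA.contains p.1 with _ | _
      · rw [← PySem.Dict.get?_eq_none_iff_contains] at h; rw [h] at hget; cases hget
      · rfl
    have hDp : dA.getD p.1 [] = p.2 := PySem.Dict.getD_of_get?_eq_some dA [] hget
    obtain ⟨hH, hM, _hI, hLe⟩ := hk p.1 hcont
    rw [hDp] at hH hM hLe
    obtain ⟨t, ht⟩ := pvSortedHead p.2 (dB.getD p.1 (0, "")).2 hM hH hLe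
    unfold pvBestStep
    rw [ht]
  rw [PySem.List.foldl_congr_mem dA.items _ _ _ hstep]
  have hfresh := PySem.Dict.items_foldl_insert_fresh dA.items
      (fun p => p.1) (fun p => (dB.getD p.1 (0, "")).2) (PySem.Dict.empty (κ := String) (ν := String))
      (fun p _ => PySem.Dict.contains_empty p.1)
      (by
        have : dA.items.map (fun p => p.1) = dA.keys := rfl
        rw [this]; exact hnd)
  rw [hfresh]
  have hndB : dB.keys.Nodup := hkeys ▸ hnd
  rw [PySem.Dict.items_eq_map_keys dA hnd [], PySem.Dict.items_eq_map_keys dB hndB (0, "")]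
  simp only [List.map_map]
  rw [hkeys]
  rfl
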